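-- pv_equiv track=rewrite | github.com/menduck/Algorithem | 프로그래머스/lv2/42885. 구명보트/구명보트.py | solution
-- ===== SOURCE A (Python) =====
-- def solution(people, limit):
--     people_sort =sorted(people, reverse=True) # 80,70,50,50
--     cnt = 0
--     for p in people_sort:
--         cnt += 1
--         if p + people_sort[-1] <= limit:
--             people_sort.pop()
--
--     return cnt
-- ===== SOURCE B (Python) =====
-- def solution(people, limit):
--     people_sorted = sorted(people)
--     cnt = 0
--     left, right = 0, len(people_sorted) - 1
--     while left <= right:
--         cnt += 1
--         if people_sorted[left] + people_sorted[right] <= limit: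
--             left += 1
--         right -= 1
--     return cnt
-- ===== Notes on version B (the rewrite author's own statement) =====
-- stated objective: simpler
-- what changed: Replaces A's iterate-over-a-list-while-popping-its-tail (mutating the sorted copy mid-iteration) with two converging indices over a fixed ascending-sorted array; no list mutation.
import Mathlib
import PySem

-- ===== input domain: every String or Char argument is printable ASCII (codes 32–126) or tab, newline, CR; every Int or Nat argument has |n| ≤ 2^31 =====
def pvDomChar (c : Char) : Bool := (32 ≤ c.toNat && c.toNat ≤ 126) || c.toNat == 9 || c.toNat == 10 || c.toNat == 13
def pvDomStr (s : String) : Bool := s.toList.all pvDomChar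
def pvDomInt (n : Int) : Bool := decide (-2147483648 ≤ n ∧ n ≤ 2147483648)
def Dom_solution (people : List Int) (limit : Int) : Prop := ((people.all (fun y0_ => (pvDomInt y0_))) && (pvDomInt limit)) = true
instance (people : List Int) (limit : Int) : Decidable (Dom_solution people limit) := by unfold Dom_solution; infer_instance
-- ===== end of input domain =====

-- B replaces A's iterate-while-popping over a mutated descending list with two
-- converging indices over a fixed ascending-sorted array (objective: simpler; no mutation).

-- ===== PORT A =====
-- Python's `for p in people_sort` over a list that is popped during iteration is
-- index-based: the loop ends when the index reaches the CURRENT length.  `pop()`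
-- is dropLast, `people_sort[-1]` is the last element (the list is nonempty whenever
-- it is read, so getLast?.getD 0 is exact).
def solutionLoopA (l : List Int) (limit : Int) (i : Nat) (cnt : Int) : Int :=
  if i < l.length then
    if l.getD i 0 + l.getLast?.getD 0 ≤ limit then
      solutionLoopA l.dropLast limit (i + 1) (cnt + 1)
    else
      solutionLoopA l limit (i + 1) (cnt + 1)
  else cnt
termination_by l.length - i
decreasing_by
  · have : l.dropLast.length = l.length - 1 := List.length_dropLast
    omega
  · omega

def solution (people : List Int) (limit : Int) : Int :=
  solutionLoopA (PySem.List.sorted people (fun x => x) true) limit 0 0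

-- ===== PORT B =====
def solutionLoopB (a : List Int) (limit : Int) (left right cnt : Int) : Int :=
  if left ≤ right then
    if a.getD left.toNat 0 + a.getD right.toNat 0 ≤ limit then
      solutionLoopB a limit (left + 1) (right - 1) (cnt + 1)
    else
      solutionLoopB a limit left (right - 1) (cnt + 1)
  else cnt
termination_by (right + 1 - left).toNat
decreasing_by
  · omega
  · omega

def solution_alt (people : List Int) (limit : Int) : Int :=
  let s := PySem.List.sorted people (fun x => x) false
  solutionLoopB s limit 0 ((s.length : Int) - 1) 0

-- ===== PRECONDITION & SPEC =====
def Spec_solution (people : List Int) (limit : Int) (out : Int) : Prop := out = solution_alt people limit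
instance (people : List Int) (limit : Int) (out : Int) : Decidable (Spec_solution people limit out) := by unfold Spec_solution; infer_instance

-- ===== CLAIM (what is proved, stated in full; the proofs are below) =====
def Claim_equal_solution : Prop := ∀ (people : List Int) (limit : Int), Dom_solution people limit → Spec_solution people limit (solution people limit)

-- ===== LEMMAS AND PROOFS =====

-- sorted(xs, reverse=True) on Int equals the reverse of sorted(xs): both are
-- permutations of xs that are pairwise non-increasing, and such a list is unique.
lemma sorted_rev_eq_reverse_sorted (xs : List Int) :
    PySem.List.sorted xs (fun x => x) true = (PySem.List.sorted xs (fun x => x) false).reverse := by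
  have h : (PySem.List.sorted xs (fun x => x) true).reverse
      = PySem.List.sorted xs (fun x => x) false := by
    apply PySem.List.eq_of_perm_of_pairwise_le_of_injective (fun x : Int => x) (fun _ _ h => h)
    · exact (List.reverse_perm _).trans
        ((PySem.List.sorted_perm xs (fun x => x) true).trans
          (PySem.List.sorted_perm xs (fun x => x) false).symm)
    · exact (List.pairwise_reverse).mpr (PySem.List.sorted_pairwise_rev xs (fun x => x))
    · exact PySem.List.sorted_pairwise xs (fun x => x)
  rw [← h, List.reverse_reverse]

lemma dropLast_reverse_drop (a : List Int) (ℓ : Nat) :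
    ((a.drop ℓ).reverse).dropLast = (a.drop (ℓ + 1)).reverse := by
  rw [List.dropLast_reverse, List.tail_drop]

-- core correspondence: A's index/pop loop on the reversed list equals B's two-pointer loop
lemma loops_eq (a : List Int) (limit : Int) :
    ∀ (k i ℓ : Nat) (cnt : Int), a.length - i ≤ k → ℓ ≤ a.length →
      solutionLoopA ((a.drop ℓ).reverse) limit i cnt
        = solutionLoopB a limit (ℓ : Int) ((a.length : Int) - 1 - i) cnt := by
  intro k
  induction k with
  | zero =>
    intro i ℓ cnt hk hl
    have hlen : ((a.drop ℓ).reverse).length = a.length - ℓ := by simp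
    rw [solutionLoopA, solutionLoopB, hlen,
      if_neg (show ¬ i < a.length - ℓ by omega),
      if_neg (show ¬ ((ℓ : Int) ≤ (a.length : Int) - 1 - (i : Int)) by omega)]
  | succ k ih =>
    intro i ℓ cnt hk hl
    have hlen : ((a.drop ℓ).reverse).length = a.length - ℓ := by simp
    by_cases hin : i < a.length - ℓ
    · rw [solutionLoopA, solutionLoopB, hlen, if_pos hin,
        if_pos (show (ℓ : Int) ≤ (a.length : Int) - 1 - (i : Int) by omega)]
      have hget1 : ((a.drop ℓ).reverse).getD i 0 = a.getD (a.length - 1 - i) 0 := by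
        rw [List.getD_eq_getElem?_getD, List.getD_eq_getElem?_getD,
          List.getElem?_reverse (by simp; omega), List.length_drop, List.getElem?_drop]
        have hidx : ℓ + (a.length - ℓ - 1 - i) = a.length - 1 - i := by omega
        rw [hidx]
      have hlast : ((a.drop ℓ).reverse).getLast?.getD 0 = a.getD ℓ 0 := by
        rw [List.getLast?_reverse, List.head?_drop, List.getD_eq_getElem?_getD]
      have htl : ((ℓ : Int)).toNat = ℓ := Int.toNat_natCast ℓ
      have htr : (((a.length : Int)) - 1 - (i : Int)).toNat = a.length - 1 - i := by omega
      rw [hget1, hlast, htl, htr,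
        Int.add_comm (a.getD ℓ 0) (a.getD (a.length - 1 - i) 0)]
      by_cases hc : a.getD (a.length - 1 - i) 0 + a.getD ℓ 0 ≤ limit
      · rw [if_pos hc, if_pos hc, dropLast_reverse_drop]
        have h := ih (i + 1) (ℓ + 1) (cnt + 1) (by omega) (by omega)
        push_cast at h
        rw [h]
        congr 1
        ring
      · rw [if_neg hc, if_neg hc]
        have h := ih (i + 1) ℓ (cnt + 1) (by omega) hl
        push_cast at h
        rw [h]
        congr 1
        ring
    · rw [solutionLoopA, solutionLoopB, hlen,
        if_neg (show ¬ i < a.length - ℓ by omega),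
        if_neg (show ¬ ((ℓ : Int) ≤ (a.length : Int) - 1 - (i : Int)) by omega)]

-- ===== VERDICT (by name: the statement is the Claim_ definition above) =====
theorem solution_spec : Claim_equal_solution := by
  intro people limit _
  show solution people limit = solution_alt people limit
  unfold solution solution_alt
  rw [sorted_rev_eq_reverse_sorted]
  have h := loops_eq (PySem.List.sorted people (fun x => x) false) limit
      (PySem.List.sorted people (fun x => x) false).length 0 0 0 (by omega) (by omega)
  simpa using h
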